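-- pv_equiv track=rewrite | github.com/Mo-Tamim/Pro_AlNaffouri_Publications | GeneratingJournalList.py | seperating_author_names
-- ===== SOURCE A (Python) =====
-- def seperating_author_names(names):
--     seperated_names = names.strip().split(' and ')
--     if len(seperated_names) <= 1:
--         seperated_names = names.strip().split(', ')
--     author_names = ''
--     for i_name in range(0, len(seperated_names)):
--         if seperated_names[i_name].count('ffouri') > 0:
--             #seperated_names[i_name] = "{\\bf " + seperated_names[i_name].strip() + '}'
--             seperated_names[i_name] = '{\\bf T. Y. Al-Naffouri}'
--         if i_name == len(seperated_names) - 1 and len(seperated_names) > 1: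
--             author_names = author_names + 'and ' + seperated_names[i_name].strip() + ','
--         else:
--             author_names = author_names + seperated_names[i_name].strip() + ', '
--     return author_names
-- ===== SOURCE B (Python) =====
-- def seperating_author_names(names):
--     stripped = names.strip()
--     parts = stripped.split(' and ')
--     if len(parts) <= 1:
--         parts = stripped.split(', ')
--
--     def fmt(p):
--         return '{\\bf T. Y. Al-Naffouri}' if p.count('ffouri') > 0 else p
--
--     def render(ps):
--         # recursion on the list: two base cases, no indices
--         if len(ps) == 1:
--             return fmt(ps[0]).strip() + ', '
--         if len(ps) == 2:
--             return fmt(ps[0]).strip() + ', ' + 'and ' + fmt(ps[1]).strip() + ','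
--         return fmt(ps[0]).strip() + ', ' + render(ps[1:])
--
--     return render(parts)
-- ===== Notes on version B (the rewrite author's own statement) =====
-- stated objective: alternative
-- what changed: A's indexed accumulator loop with a per-iteration last-index test is replaced by a structural recursion on the list of names with two base cases (one name; exactly two names, where the 'and' prefix appears), so no index arithmetic, no accumulator and no last-element test remain.
import Mathlib
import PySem

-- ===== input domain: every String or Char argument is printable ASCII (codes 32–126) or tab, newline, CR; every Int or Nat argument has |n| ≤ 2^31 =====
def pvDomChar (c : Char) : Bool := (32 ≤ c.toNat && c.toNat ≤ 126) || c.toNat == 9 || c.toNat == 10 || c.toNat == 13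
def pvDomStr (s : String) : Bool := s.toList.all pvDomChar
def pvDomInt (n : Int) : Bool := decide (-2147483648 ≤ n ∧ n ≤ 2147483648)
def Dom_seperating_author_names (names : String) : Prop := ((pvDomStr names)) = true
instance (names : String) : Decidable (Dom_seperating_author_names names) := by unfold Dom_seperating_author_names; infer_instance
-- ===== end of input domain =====

-- B replaces A's indexed accumulator loop (with its per-iteration last-index test) by a structural
-- recursion on the list of names with two base cases; same values everywhere (objective: alternative).

-- the name formatter (the identical expression occurs in both Pythons)
def pvFmt (s : List Char) : List Char :=
  if PySem.Chars.count s ("ffouri".toList) > 0 then ("{\\bf T. Y. Al-Naffouri}".toList) else s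

-- ===== PORT A =====
def seperating_author_names (names : String) : String :=
  let st := PySem.Chars.strip names.toList
  let sep0 := PySem.Chars.splitOn st (" and ".toList)
  let sep := if sep0.length ≤ 1 then PySem.Chars.splitOn st (", ".toList) else sep0
  let out := (PySem.List.pyRange 0 (PySem.List.len sep) 1).foldl
    (fun acc i =>
      let nm := pvFmt (PySem.List.pyGetD sep i [])
      if i = (sep.length : Int) - 1 ∧ 1 < sep.length then
        acc ++ ("and ".toList) ++ PySem.Chars.strip nm ++ [',']
      else
        acc ++ PySem.Chars.strip nm ++ (", ".toList)) []
  String.ofList out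

-- ===== PORT B =====
-- Source B's render: recursion on the list, base cases for one and for two names
def pvRender : List (List Char) → List Char
  | [] => []   -- unreachable: split() never returns an empty list
  | [p] => PySem.Chars.strip (pvFmt p) ++ (", ".toList)
  | [p, q] => PySem.Chars.strip (pvFmt p) ++ (", ".toList) ++ ("and ".toList)
                ++ PySem.Chars.strip (pvFmt q) ++ [',']
  | p :: q :: r :: rest =>
      PySem.Chars.strip (pvFmt p) ++ (", ".toList) ++ pvRender (q :: r :: rest)

def seperating_author_names_alt (names : String) : String :=
  let st := PySem.Chars.strip names.toList
  let parts0 := PySem.Chars.splitOn st (" and ".toList)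
  let parts := if parts0.length ≤ 1 then PySem.Chars.splitOn st (", ".toList) else parts0
  String.ofList (pvRender parts)

-- ===== PRECONDITION & SPEC =====
def Spec_seperating_author_names (names : String) (out : String) : Prop := out = seperating_author_names_alt names
instance (names : String) (out : String) : Decidable (Spec_seperating_author_names names out) := by unfold Spec_seperating_author_names; infer_instance

-- ===== CLAIM (what is proved, stated in full; the proofs are below) =====
def Claim_equal_seperating_author_names : Prop := ∀ (names : String), Dom_seperating_author_names names → Spec_seperating_author_names names (seperating_author_names names)

-- ===== LEMMAS AND PROOFS =====

-- split() in Python never returns an empty list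
lemma pv_go_ne_nil (sep : List Char) : ∀ (fuel : Nat) (l cur : List Char) (acc : List (List Char)),
    PySem.Chars.splitOn.go sep fuel l cur acc ≠ [] := by
  intro fuel
  induction fuel with
  | zero => intro l cur acc; simp [PySem.Chars.splitOn.go]
  | succ n ih =>
    intro l cur acc
    cases l with
    | nil => simp [PySem.Chars.splitOn.go]
    | cons c rest =>
      simp only [PySem.Chars.splitOn.go]
      split
      · exact ih _ _ _
      · exact ih _ _ _

lemma pv_splitOn_ne_nil (s sep : List Char) : PySem.Chars.splitOn s sep ≠ [] := by
  unfold PySem.Chars.splitOn; exact pv_go_ne_nil _ _ _ _ _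

-- A's fold over the enumerated list, with 2 ≤ remaining length, equals B's recursion
lemma pv_fold_multi (n : Nat) (hn : 2 ≤ n) :
    ∀ (l : List (List Char)) (s : Int) (acc : List Char), 2 ≤ l.length → s + l.length = n →
    (PySem.List.enumerate l s).foldl
      (fun acc p =>
        let nm := pvFmt p.2
        if p.1 = (n : Int) - 1 ∧ 1 < n then acc ++ ("and ".toList) ++ PySem.Chars.strip nm ++ [',']
        else acc ++ PySem.Chars.strip nm ++ (", ".toList)) acc
      = acc ++ pvRender l := by
  intro l
  induction l with
  | nil => intro s acc h _; simp at h
  | cons p rest ih =>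
    intro s acc h hs
    match rest, ih with
    | [], _ => simp at h
    | [q], _ =>
      have hs' : s + 2 = (n : Int) := by simpa using hs
      have h1 : ¬ (s = (n : Int) - 1 ∧ 1 < n) := by
        intro ⟨h1, _⟩; omega
      have h2 : (s + 1 = (n : Int) - 1 ∧ 1 < n) := by
        exact ⟨by omega, by omega⟩
      simp only [PySem.List.enumerate_cons, PySem.List.enumerate_nil, List.foldl_cons,
        List.foldl_nil, h1, if_false, if_pos h2, pvRender]
      simp [List.append_assoc]
    | q :: r :: rest', ih =>
      have hs' : s + ((rest'.length + 3 : Nat) : Int) = (n : Int) := by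
        simp only [List.length_cons] at hs; push_cast at hs ⊢; omega
      have h1 : ¬ (s = (n : Int) - 1 ∧ 1 < n) := by
        intro ⟨h1, _⟩; push_cast at hs'; omega
      rw [PySem.List.enumerate_cons, List.foldl_cons]
      simp only [h1, if_false]
      rw [ih (s + 1) _ (by simp) (by simp only [List.length_cons]; push_cast at hs' ⊢; omega)]
      simp [pvRender, List.append_assoc]

-- A's indexed loop equals B's recursion on any nonempty list of parts
lemma pv_main (l : List (List Char)) (hl : l ≠ []) :
    (PySem.List.pyRange 0 (PySem.List.len l) 1).foldl
      (fun acc i =>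
        let nm := pvFmt (PySem.List.pyGetD l i [])
        if i = (l.length : Int) - 1 ∧ 1 < l.length then
          acc ++ ("and ".toList) ++ PySem.Chars.strip nm ++ [',']
        else
          acc ++ PySem.Chars.strip nm ++ (", ".toList)) []
    = pvRender l := by
  have hfold : (PySem.List.pyRange 0 (PySem.List.len l) 1).foldl
      (fun acc i =>
        let nm := pvFmt (PySem.List.pyGetD l i [])
        if i = (l.length : Int) - 1 ∧ 1 < l.length then
          acc ++ ("and ".toList) ++ PySem.Chars.strip nm ++ [',']
        else
          acc ++ PySem.Chars.strip nm ++ (", ".toList)) []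
      = (PySem.List.enumerate l 0).foldl
      (fun acc p =>
        let nm := pvFmt p.2
        if p.1 = (l.length : Int) - 1 ∧ 1 < l.length then
          acc ++ ("and ".toList) ++ PySem.Chars.strip nm ++ [',']
        else
          acc ++ PySem.Chars.strip nm ++ (", ".toList)) [] := by
    rw [PySem.List.enumerate_eq_map_pyRange l [], List.foldl_map]
  rw [hfold]
  match l, hl with
  | [p], _ =>
    have h1 : ¬ ((0 : Int) = (([p] : List (List Char)).length : Int) - 1 ∧ 1 < ([p] : List (List Char)).length) := by
      simp
    simp only [PySem.List.enumerate_cons, PySem.List.enumerate_nil, List.foldl_cons,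
      List.foldl_nil, h1, if_false, pvRender]
    simp
  | p :: q :: rest, _ =>
    exact pv_fold_multi (p :: q :: rest).length (by simp) (p :: q :: rest) 0 [] (by simp) (by simp)

-- ===== VERDICT (by name: the statement is the Claim_ definition above) =====
theorem seperating_author_names_spec : Claim_equal_seperating_author_names := by
  intro names _
  unfold Spec_seperating_author_names seperating_author_names seperating_author_names_alt
  apply congrArg String.ofList
  apply pv_main
  split <;> exact pv_splitOn_ne_nil _ _
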